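-- pv_equiv track=rewrite | github.com/HomenShum/retention | backend/app/integrations/benchmark_gen.py | _parse_generated_source
-- ===== SOURCE A (Python) =====
-- from typing import Any, Dict, List, Optional
--
-- def _parse_generated_source(source: str) -> Dict[str, str]:
--     """Parse LLM-generated source code into file dict."""
--     files = {}
--     current_file = None
--     current_content = []
--
--     for line in source.split("\n"):
--         if line.startswith("=== FILE:") and line.endswith("==="):
--             if current_file:
--                 files[current_file] = "\n".join(current_content)
--             current_file = line.replace("=== FILE:", "").replace("===", "").strip()
--             current_content = []
--         elif line.startswith("```") and current_file is None:
--             # Skip markdown fences at the top level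
--             continue
--         else:
--             current_content.append(line)
--
--     if current_file:
--         files[current_file] = "\n".join(current_content)
--
--     return files
-- ===== SOURCE B (Python) =====
-- def _parse_generated_source(source: str):
--     """Split the source into marker-delimited sections first, then build the dict."""
--     lines = source.split("\n")
--     n = len(lines)
--
--     def is_marker(ln):
--         return ln.startswith("=== FILE:") and ln.endswith("===")
--
--     def next_marker(k):
--         while k < n and not is_marker(lines[k]):
--             k += 1
--         return k
--
--     sections = []
--     k = next_marker(0)
--     while k < n:
--         name = lines[k].replace("=== FILE:", "").replace("===", "").strip()
--         j = next_marker(k + 1)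
--         sections.append((name, "\n".join(lines[k + 1:j])))
--         k = j
--     return {name: body for name, body in sections if name}
-- ===== Notes on version B (the rewrite author's own statement) =====
-- stated objective: alternative
-- what changed: Replaces A's single-pass state machine (current_file/current_content accumulators with a top-level fence skip) by a two-level scan that first slices the line list into marker-delimited (name, body) sections and then builds the dict from that section list.
import Mathlib
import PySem

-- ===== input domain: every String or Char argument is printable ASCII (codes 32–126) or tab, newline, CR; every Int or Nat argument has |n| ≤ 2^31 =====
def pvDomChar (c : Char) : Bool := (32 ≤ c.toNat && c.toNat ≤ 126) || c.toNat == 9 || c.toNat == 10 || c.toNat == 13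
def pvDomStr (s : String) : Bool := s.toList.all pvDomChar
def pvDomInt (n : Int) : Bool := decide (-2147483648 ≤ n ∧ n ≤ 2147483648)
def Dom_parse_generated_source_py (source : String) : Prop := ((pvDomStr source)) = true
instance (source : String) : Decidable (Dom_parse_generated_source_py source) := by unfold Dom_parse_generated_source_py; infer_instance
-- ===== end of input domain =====

-- B replaces A's one-pass state machine by a two-level scan that first slices the line list into marker-delimited (name, body) sections and then builds the dict from that list (alternative decomposition, same cost).

-- ===== PORT A =====
-- save step: Python's  `if current_file: files[current_file] = "\n".join(current_content)`
def pvASave (files : PySem.Dict String String) (currentFile : Option String)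
    (currentContent : List String) : PySem.Dict String String :=
  match currentFile with
  | none => files
  | some f => if f == "" then files else PySem.Dict.insert files f (PySem.Str.join "\n" currentContent)

-- one iteration of A's `for line in source.split("\n")`
def pvAStep (st : PySem.Dict String String × Option String × List String) (line : String) :
    PySem.Dict String String × Option String × List String :=
  if PySem.Str.startswith line "=== FILE:" && PySem.Str.endswith line "===" then
    (pvASave st.1 st.2.1 st.2.2,
     some (PySem.Str.strip (PySem.Str.replace (PySem.Str.replace line "=== FILE:" "") "===" "")),
     [])
  else if PySem.Str.startswith line "```" && st.2.1.isNone then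
    st
  else
    (st.1, st.2.1, st.2.2 ++ [line])

def parse_generated_source_py (source : String) : List (String × String) :=
  let st := ((PySem.Str.split? source "\n").getD []).foldl pvAStep (PySem.Dict.empty, none, [])
  (pvASave st.1 st.2.1 st.2.2).items

-- ===== PORT B =====
def pvIsMarker (line : String) : Bool :=
  PySem.Str.startswith line "=== FILE:" && PySem.Str.endswith line "==="

def pvMarkerName (line : String) : String :=
  PySem.Str.strip (PySem.Str.replace (PySem.Str.replace line "=== FILE:" "") "===" "")

-- `next_marker(k)`: first index ≥ k of a marker line (or len(lines))
def pvNextMarker (lines : List String) (k : Nat) : Nat :=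
  if h : k < lines.length then
    if pvIsMarker lines[k] then k else pvNextMarker lines (k + 1)
  else k
termination_by lines.length - k

theorem pvNextMarker_ge (lines : List String) (k : Nat) : k ≤ pvNextMarker lines k := by
  unfold pvNextMarker
  split
  · split
    · exact Nat.le_refl k
    · exact Nat.le_trans (Nat.le_succ k) (pvNextMarker_ge lines (k + 1))
  · exact Nat.le_refl k
termination_by lines.length - k

-- B's `while k < n:` loop collecting the (name, body) section list
def pvBLoop (lines : List String) (k : Nat) (acc : List (String × String)) :
    List (String × String) :=
  if h : k < lines.length then
    pvBLoop lines (pvNextMarker lines (k + 1))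
      (acc ++ [(pvMarkerName lines[k],
                PySem.Str.join "\n" (PySem.List.slice lines (some ((k + 1 : Nat) : Int))
                  (some ((pvNextMarker lines (k + 1) : Nat) : Int))))])
  else acc
termination_by lines.length - k
decreasing_by
  have := pvNextMarker_ge lines (k + 1)
  omega

def parse_generated_source_py_alt (source : String) : List (String × String) :=
  let lines := (PySem.Str.split? source "\n").getD []
  let sections := pvBLoop lines (pvNextMarker lines 0) []
  (sections.foldl
    (fun d p => if p.1 == "" then d else PySem.Dict.insert d p.1 p.2)
    PySem.Dict.empty).items

-- ===== PRECONDITION & SPEC =====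
def Spec_parse_generated_source_py (source : String) (out : List (String × String)) : Prop := out = parse_generated_source_py_alt source
instance (source : String) (out : List (String × String)) : Decidable (Spec_parse_generated_source_py source out) := by unfold Spec_parse_generated_source_py; infer_instance

-- ===== CLAIM (what is proved, stated in full; the proofs are below) =====
def Claim_equal_parse_generated_source_py : Prop := ∀ (source : String), Dom_parse_generated_source_py source → Spec_parse_generated_source_py source (parse_generated_source_py source)

-- ===== LEMMAS AND PROOFS =====

-- the common mid-level value: the marker-delimited sections of a line list, structurally
def pvSegs : List String → List (String × String)
  | [] => []
  | l :: ls =>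
    if pvIsMarker l then
      (pvMarkerName l, PySem.Str.join "\n" (ls.takeWhile (fun x => !pvIsMarker x)))
        :: pvSegs (ls.dropWhile (fun x => !pvIsMarker x))
    else pvSegs ls
termination_by ls => ls.length
decreasing_by
  · exact Nat.lt_succ_of_le (List.length_dropWhile_le _ _)
  · exact Nat.lt_succ_of_le (Nat.le_refl _)

def pvIns (d : PySem.Dict String String) (p : String × String) : PySem.Dict String String :=
  if p.1 == "" then d else PySem.Dict.insert d p.1 p.2

-- A's fold-and-final-save, as one function of the loop state
def pvAF (ls : List String) (files : PySem.Dict String String) (cf : Option String)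
    (cc : List String) : PySem.Dict String String :=
  pvASave (ls.foldl pvAStep (files, cf, cc)).1 (ls.foldl pvAStep (files, cf, cc)).2.1
    (ls.foldl pvAStep (files, cf, cc)).2.2

theorem pvAF_some (ls : List String) : ∀ (files : PySem.Dict String String) (nm : String)
    (acc : List String),
    pvAF ls files (some nm) acc =
      ((nm, PySem.Str.join "\n" (acc ++ ls.takeWhile (fun x => !pvIsMarker x)))
        :: pvSegs (ls.dropWhile (fun x => !pvIsMarker x))).foldl pvIns files := by
  induction ls with
  | nil =>
    intro files nm acc
    simp [pvAF, pvASave, pvIns, pvSegs]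
  | cons l ls ih =>
    intro files nm acc
    by_cases hm : pvIsMarker l
    · have hstep : pvAStep (files, some nm, acc) l =
        (pvIns files (nm, PySem.Str.join "\n" acc), some (pvMarkerName l), []) := by
        simp [pvAStep, pvIsMarker, pvMarkerName, pvASave, pvIns] at hm ⊢
        simp [hm.1, hm.2]
      simp only [pvAF, List.foldl_cons, hstep]
      have := ih (pvIns files (nm, PySem.Str.join "\n" acc)) (pvMarkerName l) []
      simp only [pvAF] at this
      rw [this]
      simp [pvSegs, hm]
    · have hstep : pvAStep (files, some nm, acc) l = (files, some nm, acc ++ [l]) := by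
        simp only [pvAStep, pvIsMarker] at hm ⊢
        rw [if_neg (by simpa using hm)]
        simp
      simp only [pvAF, List.foldl_cons, hstep]
      have := ih files nm (acc ++ [l])
      simp only [pvAF] at this
      rw [this]
      simp [hm]

theorem pvAF_none (ls : List String) : ∀ (files : PySem.Dict String String) (cc : List String),
    pvAF ls files none cc = (pvSegs ls).foldl pvIns files := by
  induction ls with
  | nil => intro files cc; simp [pvAF, pvASave, pvSegs]
  | cons l ls ih =>
    intro files cc
    by_cases hm : pvIsMarker l
    · have hstep : pvAStep (files, none, cc) l = (files, some (pvMarkerName l), []) := by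
        simp [pvAStep, pvIsMarker, pvMarkerName, pvASave] at hm ⊢
        simp [hm.1, hm.2]
      simp only [pvAF, List.foldl_cons, hstep]
      have := pvAF_some ls files (pvMarkerName l) []
      simp only [pvAF] at this
      rw [this]
      simp [pvSegs, hm]
    · by_cases hb : PySem.Chars.startswith l.toList ['`', '`', '`'] = true
      · have hstep : pvAStep (files, none, cc) l = (files, none, cc) := by
          simp only [pvAStep, pvIsMarker] at hm ⊢
          rw [if_neg (by simpa using hm)]
          simp [hb]
        simp only [pvAF, List.foldl_cons, hstep]
        have := ih files cc
        simp only [pvAF] at this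
        rw [this, pvSegs]
        simp [hm]
      · have hstep : pvAStep (files, none, cc) l = (files, none, cc ++ [l]) := by
          simp only [pvAStep, pvIsMarker] at hm ⊢
          rw [if_neg (by simpa using hm)]
          simp [hb]
        simp only [pvAF, List.foldl_cons, hstep]
        have := ih files (cc ++ [l])
        simp only [pvAF] at this
        rw [this, pvSegs]
        simp [hm]

-- pvNextMarker facts
theorem pvNextMarker_le_length (lines : List String) (k : Nat) (hk : k ≤ lines.length) :
    pvNextMarker lines k ≤ lines.length := by
  unfold pvNextMarker
  split
  · split
    · omega
    · exact pvNextMarker_le_length lines (k + 1) (by omega)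
  · exact hk
termination_by lines.length - k

theorem pvNextMarker_drop (lines : List String) (k : Nat) :
    lines.drop (pvNextMarker lines k) = (lines.drop k).dropWhile (fun x => !pvIsMarker x) := by
  by_cases hk : k < lines.length
  · have hcons : lines.drop k = lines[k] :: lines.drop (k + 1) := (List.getElem_cons_drop hk).symm
    by_cases hm : pvIsMarker lines[k]
    · have he : pvNextMarker lines k = k := by rw [pvNextMarker]; simp [hk, hm]
      rw [he, hcons, List.dropWhile_cons]
      simp [hm]
    · have he : pvNextMarker lines k = pvNextMarker lines (k + 1) := by
        rw [pvNextMarker]; simp [hk, hm]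
      rw [he, hcons, List.dropWhile_cons, if_pos (by simp [hm])]
      exact pvNextMarker_drop lines (k + 1)
  · have he : pvNextMarker lines k = k := by rw [pvNextMarker]; simp [hk]
    rw [he, List.drop_eq_nil_of_le (by omega)]
    simp
termination_by lines.length - k

theorem pvNextMarker_take (lines : List String) (k : Nat) :
    (lines.drop k).takeWhile (fun x => !pvIsMarker x) =
      (lines.drop k).take (pvNextMarker lines k - k) := by
  by_cases hk : k < lines.length
  · have hcons : lines.drop k = lines[k] :: lines.drop (k + 1) := (List.getElem_cons_drop hk).symm
    by_cases hm : pvIsMarker lines[k]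
    · have he : pvNextMarker lines k = k := by rw [pvNextMarker]; simp [hk, hm]
      rw [he, hcons, List.takeWhile_cons]
      simp [hm]
    · have he : pvNextMarker lines k = pvNextMarker lines (k + 1) := by
        rw [pvNextMarker]; simp [hk, hm]
      have hge := pvNextMarker_ge lines (k + 1)
      have hsub : pvNextMarker lines (k + 1) - k = (pvNextMarker lines (k + 1) - (k + 1)) + 1 := by
        omega
      rw [he, hcons, List.takeWhile_cons, if_pos (by simp [hm]), hsub, List.take_succ_cons]
      exact congrArg (lines[k] :: ·) (pvNextMarker_take lines (k + 1))
  · have he : pvNextMarker lines k = k := by rw [pvNextMarker]; simp [hk]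
    rw [he, List.drop_eq_nil_of_le (by omega)]
    simp
termination_by lines.length - k

theorem pvNextMarker_marker (lines : List String) (k : Nat)
    (h : pvNextMarker lines k < lines.length) :
    pvIsMarker (lines[pvNextMarker lines k]'h) = true := by
  by_cases hk : k < lines.length
  · by_cases hm : pvIsMarker lines[k]
    · have he : pvNextMarker lines k = k := by rw [pvNextMarker]; simp [hk, hm]
      simp only [he] at h ⊢
      exact hm
    · have he : pvNextMarker lines k = pvNextMarker lines (k + 1) := by
        rw [pvNextMarker]; simp [hk, hm]
      simp only [he] at h ⊢
      exact pvNextMarker_marker lines (k + 1) h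
  · have he : pvNextMarker lines k = k := by rw [pvNextMarker]; simp [hk]
    rw [he] at h
    omega
termination_by lines.length - k

theorem pvSegs_dropWhile (ds : List String) :
    pvSegs (ds.dropWhile (fun x => !pvIsMarker x)) = pvSegs ds := by
  induction ds with
  | nil => simp
  | cons l ls ih =>
    by_cases hm : pvIsMarker l
    · simp [hm]
    · rw [List.dropWhile_cons, if_pos (by simpa using hm), ih, pvSegs, if_neg hm]

theorem pvBLoop_eq_segs (lines : List String) (k : Nat) (hk : k ≤ lines.length) :
    ∀ acc, pvBLoop lines (pvNextMarker lines k) acc = acc ++ pvSegs (lines.drop k) := by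
  intro acc
  have hle := pvNextMarker_le_length lines k hk
  have hdrop := pvNextMarker_drop lines k
  rw [pvBLoop]
  split
  · rename_i h
    have hm := pvNextMarker_marker lines k h
    set m := pvNextMarker lines k with hmdef
    have hcons : lines.drop m = lines[m] :: lines.drop (m + 1) := (List.getElem_cons_drop h).symm
    have hrec := pvBLoop_eq_segs lines (m + 1) (by omega)
    rw [hrec]
    have hsegk : pvSegs (lines.drop k) = pvSegs (lines.drop m) := by
      rw [← pvSegs_dropWhile (lines.drop k), ← hdrop]
    rw [hsegk, hcons, pvSegs, if_pos hm, pvSegs_dropWhile, List.append_assoc]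
    simp only [List.singleton_append, ← hmdef]
    rw [PySem.List.slice_natCast, pvNextMarker_take lines (m + 1)]
  · rename_i h
    have hmeq : pvNextMarker lines k = lines.length := by omega
    have hnil : (lines.drop k).dropWhile (fun x => !pvIsMarker x) = [] := by
      rw [← hdrop, hmeq, List.drop_length]
    rw [← pvSegs_dropWhile (lines.drop k), hnil]
    simp [pvSegs]
termination_by lines.length - k
decreasing_by
  have := pvNextMarker_ge lines k
  omega

theorem pvKey (ls : List String) :
    (pvAF ls PySem.Dict.empty none []).items =
      ((pvBLoop ls (pvNextMarker ls 0) []).foldl pvIns PySem.Dict.empty).items := by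
  have hB := pvBLoop_eq_segs ls 0 (Nat.zero_le _) []
  simp only [List.drop_zero, List.nil_append] at hB
  rw [hB, pvAF_none]

-- ===== VERDICT (by name: the statement is the Claim_ definition above) =====
theorem parse_generated_source_py_spec : Claim_equal_parse_generated_source_py := by
  intro source _
  show parse_generated_source_py source = parse_generated_source_py_alt source
  exact pvKey ((PySem.Str.split? source "\n").getD [])
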